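-- pv_equiv track=rewrite | github.com/hyang0129/onlycodes | problems/artifact/enumeration/subset_sum_count/grader/hidden.py | _parse_subset
-- ===== SOURCE A (Python) =====
-- def _parse_subset(obj, n: int) -> tuple | None:
--     if not isinstance(obj, list):
--         return None
--     if not all(isinstance(v, int) for v in obj):
--         return None
--     if any(v < 0 or v >= n for v in obj):
--         return None
--     if obj != sorted(obj):
--         return None
--     if len(set(obj)) != len(obj):
--         return None
--     return tuple(obj)
-- ===== SOURCE B (Python) =====
-- def _parse_subset(obj, n: int) -> tuple | None:
--     if not isinstance(obj, list):
--         return None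
--     prev = -1
--     for v in obj:
--         if not isinstance(v, int) or v < 0 or v >= n or v <= prev:
--             return None
--         prev = v
--     return tuple(obj)
-- ===== Notes on version B (the rewrite author's own statement) =====
-- stated objective: simpler
-- what changed: Replaces A's four separate passes (type scan, bounds scan, sorted() comparison, set() dedup count) by one linear short-circuiting pass tracking the previous element: strict increase enforces sortedness and distinctness at once.
import Mathlib
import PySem

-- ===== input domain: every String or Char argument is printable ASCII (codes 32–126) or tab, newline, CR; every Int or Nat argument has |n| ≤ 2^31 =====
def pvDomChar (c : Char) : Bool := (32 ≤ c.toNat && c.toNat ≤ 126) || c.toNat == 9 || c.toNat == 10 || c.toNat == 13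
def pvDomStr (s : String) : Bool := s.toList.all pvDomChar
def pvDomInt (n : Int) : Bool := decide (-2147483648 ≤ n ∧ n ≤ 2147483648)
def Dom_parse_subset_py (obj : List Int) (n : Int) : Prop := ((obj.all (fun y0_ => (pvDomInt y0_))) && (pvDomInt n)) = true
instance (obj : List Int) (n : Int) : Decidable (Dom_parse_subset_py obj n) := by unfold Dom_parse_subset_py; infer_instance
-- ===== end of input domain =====

-- B replaces A's four separate passes (type scan, bounds scan, sorted() comparison,
-- set() dedup count) by one linear pass tracking the previous element (objective: simpler).

-- ===== PORT A =====
-- isinstance(obj, list) and the all(isinstance(v, int)) scan are always true under the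
-- type convention (obj : List Int), so those two guards never fire.
def parse_subset_py (obj : List Int) (n : Int) : Option (List Int) :=
  if obj.any (fun v => decide (v < 0) || decide (n ≤ v)) then none
  else if obj ≠ PySem.List.sorted obj (fun x => x) false then none
  else if (PySem.Set.ofList obj).length ≠ obj.length then none
  else some obj

-- ===== PORT B =====
-- the for-loop of Source B: prev is the accumulator, early return None on a failed check
def pvAltLoop (n : Int) (prev : Int) : List Int → Bool
  | [] => true
  | v :: rest => if v < 0 || n ≤ v || v ≤ prev then false else pvAltLoop n v rest

def parse_subset_py_alt (obj : List Int) (n : Int) : Option (List Int) :=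
  if pvAltLoop n (-1) obj then some obj else none

-- ===== PRECONDITION & SPEC =====
def Spec_parse_subset_py (obj : List Int) (n : Int) (out : Option (List Int)) : Prop := out = parse_subset_py_alt obj n
instance (obj : List Int) (n : Int) (out : Option (List Int)) : Decidable (Spec_parse_subset_py obj n out) := by unfold Spec_parse_subset_py; infer_instance

-- ===== CLAIM (what is proved, stated in full; the proofs are below) =====
def Claim_equal_parse_subset_py : Prop := ∀ (obj : List Int) (n : Int), Dom_parse_subset_py obj n → Spec_parse_subset_py obj n (parse_subset_py obj n)

-- ===== LEMMAS AND PROOFS =====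

-- B's loop succeeds iff every element is in bounds and the list is a strict chain above prev
theorem pvAltLoop_iff (n : Int) (prev : Int) (obj : List Int) :
    pvAltLoop n prev obj = true ↔
      (∀ v ∈ obj, 0 ≤ v ∧ v < n) ∧ List.IsChain (· < ·) (prev :: obj) := by
  induction obj generalizing prev with
  | nil => simp [pvAltLoop]
  | cons v rest ih =>
    simp only [pvAltLoop, List.mem_cons, List.isChain_cons_cons]
    by_cases h : v < 0 ∨ n ≤ v ∨ v ≤ prev
    · have hh : (decide (v < 0) || decide (n ≤ v) || decide (v ≤ prev)) = true := by
        simp only [Bool.or_eq_true, decide_eq_true_iff]; tauto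
      rw [if_pos hh]
      constructor
      · intro h'; simp at h'
      · rintro ⟨hb, _, hc⟩
        have h1 := hb v (Or.inl rfl)
        rcases h with h | h | h <;> omega
    · push_neg at h
      have hh : (decide (v < 0) || decide (n ≤ v) || decide (v ≤ prev)) = false := by
        simp only [Bool.or_eq_false_iff, decide_eq_false_iff_not]; omega
      rw [if_neg (by simp [hh])]
      rw [ih v]
      constructor
      · rintro ⟨hb, hc⟩
        refine ⟨fun w hw => ?_, by omega, hc⟩
        rcases hw with rfl | hw
        · exact ⟨by omega, by omega⟩
        · exact hb w hw
      · rintro ⟨hb, _, hc⟩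
        exact ⟨fun w hw => hb w (Or.inr hw), hc⟩

-- set(xs) has the same length as xs iff xs has no duplicates
theorem length_ofList_eq_iff {α : Type} [DecidableEq α] (xs : List α) :
    (PySem.Set.ofList xs).length = xs.length ↔ xs.Nodup := by
  induction xs using List.reverseRecOn with
  | nil => simp [PySem.Set.ofList]
  | append_singleton xs x ih =>
    rw [PySem.Set.ofList_append_singleton]
    by_cases hx : x ∈ xs
    · have hmem : x ∈ PySem.Set.ofList xs := (PySem.Set.mem_ofList xs x).2 hx
      have hlen := PySem.Set.length_ofList_le (xs := xs)
      have : PySem.Set.add (PySem.Set.ofList xs) x = PySem.Set.ofList xs := by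
        simp [PySem.Set.add, PySem.Set.contains, hmem]
      rw [this]
      simp only [List.length_append, List.length_singleton, List.nodup_append]
      constructor
      · intro h; omega
      · rintro ⟨_, _, hd⟩; exact (hd x hx x (by simp) rfl).elim
    · have hmem : x ∉ PySem.Set.ofList xs := fun h => hx ((PySem.Set.mem_ofList xs x).1 h)
      have : PySem.Set.add (PySem.Set.ofList xs) x = PySem.Set.ofList xs ++ [x] := by
        simp [PySem.Set.add, PySem.Set.contains, hmem]
      rw [this]
      simp only [List.length_append, List.length_singleton, List.nodup_append]
      constructor
      · intro h
        refine ⟨ih.1 (by omega), List.nodup_singleton x, ?_⟩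
        intro a ha b hb; simp at hb; subst hb; exact fun h => hx (h ▸ ha)
      · rintro ⟨hn, _, _⟩; rw [ih.2 hn]

theorem parse_eq (obj : List Int) (n : Int) :
    parse_subset_py obj n = parse_subset_py_alt obj n := by
  unfold parse_subset_py parse_subset_py_alt
  by_cases hB : pvAltLoop n (-1) obj = true
  · obtain ⟨hb, hc⟩ := (pvAltLoop_iff n (-1) obj).1 hB
    have hpw : obj.Pairwise (· < ·) := by
      have := List.isChain_iff_pairwise.1 hc
      exact (List.pairwise_cons.1 this).2
    have hany : obj.any (fun v => decide (v < 0) || decide (n ≤ v)) = false := by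
      simp only [List.any_eq_false]
      intro v hv
      have := hb v hv
      simp [decide_eq_false_iff_not]; omega
    have hsorted : PySem.List.sorted obj (fun x => x) false = obj :=
      PySem.List.sorted_eq_self_of_pairwise _ _ (hpw.imp (fun h => le_of_lt h))
    have hnd : obj.Nodup := hpw.imp (fun h => ne_of_lt h)
    rw [if_pos hB, hany]
    simp [hsorted, (length_ofList_eq_iff obj).2 hnd]
  · rw [if_neg hB]
    by_cases hany : obj.any (fun v => decide (v < 0) || decide (n ≤ v)) = true
    · rw [if_pos hany]
    · rw [if_neg hany]
      have hb : ∀ v ∈ obj, 0 ≤ v ∧ v < n := by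
        simp only [List.any_eq_true, Bool.or_eq_true, decide_eq_true_iff, not_exists, not_or] at hany
        intro v hv
        have h2 := hany v
        rw [not_and_or, not_or] at h2
        rcases h2 with h2 | h2
        · exact absurd hv h2
        · omega
      by_cases hs : obj = PySem.List.sorted obj (fun x => x) false
      · rw [if_neg (not_not_intro hs)]
        by_cases hl : (PySem.Set.ofList obj).length = obj.length
        · exfalso
          have hnd : obj.Nodup := (length_ofList_eq_iff obj).1 hl
          have hle : obj.Pairwise (· ≤ ·) := by
            have := PySem.List.sorted_pairwise (xs := obj) (key := fun x => x)
            rw [← hs] at this; exact this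
          have hpw : obj.Pairwise (· < ·) := by
            have hne : obj.Pairwise (· ≠ ·) := hnd
            exact (hle.and hne).imp (fun h => lt_of_le_of_ne h.1 h.2)
          have hchain : List.IsChain (· < ·) ((-1 : Int) :: obj) := by
            rw [List.isChain_iff_pairwise]
            exact List.pairwise_cons.2 ⟨fun v hv => by have := (hb v hv).1; omega, hpw⟩
          exact hB ((pvAltLoop_iff n (-1) obj).2 ⟨hb, hchain⟩)
        · rw [if_pos (by simpa using hl)]
      · rw [if_pos (by simpa using hs)]

-- ===== VERDICT (by name: the statement is the Claim_ definition above) =====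
theorem parse_subset_py_spec : Claim_equal_parse_subset_py := by
  intro obj n _
  unfold Spec_parse_subset_py
  exact parse_eq obj n
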